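-- pv_equiv track=rewrite | github.com/shft1/Algorithms-Structures-Tasks | Marathon 8.0/Party 7-8/H. Премии от начальника*/solution.py | solution
-- ===== SOURCE A (Python) =====
-- def solution(n, days):
--     diff_arr = [0] * n
--     for i in range(n - 1):
--         sumi = i + days[i]
--         if sumi <= i + 1:
--             continue
--         diff_arr[i + 1] += 1
--         if sumi < n:
--             diff_arr[sumi] -= 1
--     prefix_sum = [0] * n
--     for i in range(1, n):
--         prefix_sum[i] = prefix_sum[i - 1] + diff_arr[i]
--     prize = 0
--     for i in range(n):
--         prize += prefix_sum[i] * days[i]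
--     return prize
-- ===== SOURCE B (Python) =====
-- def solution(n, days):
--     if n <= 0:
--         return 0
--     S = [0] * (n + 1)
--     for k in range(1, n + 1):
--         S[k] = S[k - 1] + days[k - 1]
--     prize = 0
--     for j in range(n - 1):
--         hi = min(j + days[j], n)
--         if hi > j + 1:
--             prize += S[hi] - S[j + 1]
--     return prize
-- ===== Notes on version B (the rewrite author's own statement) =====
-- stated objective: simpler
-- what changed: Replaces the difference-array of coverage counts plus a weighted final pass with a single prefix-sum array over the day values and one pass of direct range-sum queries.
import Mathlib
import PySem

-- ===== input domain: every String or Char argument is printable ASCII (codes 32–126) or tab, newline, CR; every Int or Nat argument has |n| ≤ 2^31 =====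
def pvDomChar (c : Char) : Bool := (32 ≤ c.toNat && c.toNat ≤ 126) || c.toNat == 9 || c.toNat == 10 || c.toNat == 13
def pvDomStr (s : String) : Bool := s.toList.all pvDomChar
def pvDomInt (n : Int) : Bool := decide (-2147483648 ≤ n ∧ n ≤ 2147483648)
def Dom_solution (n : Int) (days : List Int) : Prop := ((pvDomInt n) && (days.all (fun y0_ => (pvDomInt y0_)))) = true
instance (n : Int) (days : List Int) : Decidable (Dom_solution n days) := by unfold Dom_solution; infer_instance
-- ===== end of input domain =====

-- B replaces A's difference-array of coverage counts (plus weighted final pass) by one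
-- prefix-sum array over the day values and a single pass of range-sum queries (simpler, same O(n)).

-- ===== PORT A =====
-- body of A's first loop (diff_arr update for one i)
def aDiffStep (n : Int) (days : List Int) (arr : List Int) (i : Int) : List Int :=
  let sumi := i + PySem.List.pyGetD days i 0
  if sumi ≤ i + 1 then arr
  else
    let arr' := PySem.List.pySetD arr (i+1) (PySem.List.pyGetD arr (i+1) 0 + 1)
    if sumi < n then PySem.List.pySetD arr' sumi (PySem.List.pyGetD arr' sumi 0 - 1) else arr'

-- body of A's second loop (prefix_sum[i] = prefix_sum[i-1] + diff_arr[i])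
def aPreStep (diff : List Int) (arr : List Int) (i : Int) : List Int :=
  PySem.List.pySetD arr i (PySem.List.pyGetD arr (i-1) 0 + PySem.List.pyGetD diff i 0)

def solution (n : Int) (days : List Int) : Int :=
  let diff := (PySem.List.pyRange 0 (n-1) 1).foldl (aDiffStep n days) (PySem.List.pyRepeat [0] n)
  let pre := (PySem.List.pyRange 1 n 1).foldl (aPreStep diff) (PySem.List.pyRepeat [0] n)
  (PySem.List.pyRange 0 n 1).foldl
    (fun prize i => prize + PySem.List.pyGetD pre i 0 * PySem.List.pyGetD days i 0) 0

-- ===== PORT B =====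
-- body of B's prefix-sum loop (S[k] = S[k-1] + days[k-1])
def bSStep (days : List Int) (arr : List Int) (k : Int) : List Int :=
  PySem.List.pySetD arr k (PySem.List.pyGetD arr (k-1) 0 + PySem.List.pyGetD days (k-1) 0)

def solution_alt (n : Int) (days : List Int) : Int :=
  if n ≤ 0 then 0
  else
    let S := (PySem.List.pyRange 1 (n+1) 1).foldl (bSStep days) (PySem.List.pyRepeat [0] (n+1))
    (PySem.List.pyRange 0 (n-1) 1).foldl
      (fun prize j =>
        let hi := min (j + PySem.List.pyGetD days j 0) n
        if hi > j + 1 then prize + (PySem.List.pyGetD S hi 0 - PySem.List.pyGetD S (j+1) 0)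
        else prize) 0

-- ===== PRECONDITION & SPEC =====
-- Pre_ excludes exactly the inputs where Python A raises IndexError: lists shorter than n.
def Pre_solution (n : Int) (days : List Int) : Prop := n ≤ (days.length : Int)
instance (n : Int) (days : List Int) : Decidable (Pre_solution n days) := by
  unfold Pre_solution; infer_instance
def pvWitness_solution : Int × List Int := (3, [2, 5, 1])
def Spec_solution (n : Int) (days : List Int) (out : Int) : Prop := out = solution_alt n days
instance (n : Int) (days : List Int) (out : Int) : Decidable (Spec_solution n days out) := by
  unfold Spec_solution; infer_instance

-- ===== CLAIM (what is proved, stated in full; the proofs are below) =====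
def Claim_equal_solution : Prop := ∀ (n : Int) (days : List Int), Dom_solution n days → Pre_solution n days → Spec_solution n days (solution n days)

-- ===== LEMMAS AND PROOFS =====

-- days[t] (default 0), prefix sums, A's per-iteration diff-array weight, and the common
-- per-source contribution both programs are shown to sum.
def pvDay (days : List Int) (t : Nat) : Int := days.getD t 0

def pvPs (days : List Int) (k : Nat) : Int := ∑ t ∈ Finset.range k, pvDay days t

def pvSumI (days : List Int) (j : Nat) : Int := (j : Int) + pvDay days j

def pvW (n : Int) (days : List Int) (j t : Nat) : Int :=
  if pvSumI days j ≤ (j : Int) + 1 then 0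
  else (if t = j + 1 then 1 else 0)
       - (if (t : Int) = pvSumI days j ∧ pvSumI days j < n then 1 else 0)

def pvContrib (n : Int) (days : List Int) (j : Nat) : Int :=
  if (j : Int) + 1 < min (pvSumI days j) n
  then pvPs days (min (pvSumI days j) n).toNat - pvPs days (j + 1)
  else 0

theorem diffBuild (n : Int) (days : List Int) (hn : 0 < n) (m : Nat) (hm : m ≤ n.toNat - 1) :
    ((List.range m).foldl (fun (arr : List Int) (k : Nat) => aDiffStep n days arr (k : Int))
      (List.replicate n.toNat 0)).length = n.toNat ∧
    ∀ t : Nat, t < n.toNat →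
      PySem.List.pyGetD ((List.range m).foldl (fun (arr : List Int) (k : Nat) => aDiffStep n days arr (k : Int))
        (List.replicate n.toNat 0)) (↑t) 0 = ∑ j ∈ Finset.range m, pvW n days j t := by
  induction m with
  | zero =>
    refine ⟨by simp, ?_⟩
    intro t ht
    rw [List.range_zero, List.foldl_nil, PySem.List.pyGetD_natCast, List.getD_replicate _ ht]
    simp
  | succ m ih =>
    obtain ⟨ihlen, ihval⟩ := ih (by omega)
    rw [List.range_succ, List.foldl_append, List.foldl_cons, List.foldl_nil]
    set D := (List.range m).foldl (fun (arr : List Int) (k : Nat) => aDiffStep n days arr (k : Int))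
      (List.replicate n.toNat 0) with hD
    have hmN : m + 1 < n.toNat := by omega
    rw [show aDiffStep n days D (↑m)
        = (if pvSumI days m ≤ (m : Int) + 1 then D
           else
             let arr' := PySem.List.pySetD D ((m : Int)+1) (PySem.List.pyGetD D ((m : Int)+1) 0 + 1)
             if pvSumI days m < n then
               PySem.List.pySetD arr' (pvSumI days m) (PySem.List.pyGetD arr' (pvSumI days m) 0 - 1)
             else arr')
      from by simp only [aDiffStep, pvSumI, pvDay, PySem.List.pyGetD_natCast]]
    by_cases h1 : pvSumI days m ≤ (m : Int) + 1
    · rw [if_pos h1]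
      refine ⟨ihlen, ?_⟩
      intro t ht
      rw [ihval t ht, Finset.sum_range_succ, pvW, if_pos h1, add_zero]
    · rw [if_neg h1]
      have hc1 : ((m : Int) + 1) = ((m + 1 : Nat) : Int) := by push_cast; ring
      have hnn : 0 ≤ pvSumI days m := by have : (0:Int) ≤ (m:Int) := Int.natCast_nonneg m; omega
      have hcast : ∀ t : Nat, ((t : Int) = pvSumI days m ↔ t = (pvSumI days m).toNat) := by
        intro t; omega
      by_cases h2 : pvSumI days m < n
      · rw [if_pos h2]
        set s := (pvSumI days m).toNat with hs
        have hsv : (s : Int) = pvSumI days m := Int.toNat_of_nonneg hnn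
        have hsm : m + 1 < s := by omega
        have hsN : s < n.toNat := by omega
        rw [hc1, ← hsv]
        constructor
        · rw [PySem.List.length_pySetD, PySem.List.length_pySetD]; exact ihlen
        intro t ht
        rw [PySem.List.pyGetD_pySetD_natCast _ _ _ _ _
              (by rw [PySem.List.length_pySetD, ihlen]; exact hsN),
            PySem.List.pyGetD_pySetD_natCast _ _ _ _ _ (by rw [ihlen]; exact hmN),
            PySem.List.pyGetD_pySetD_natCast _ _ _ _ _ (by rw [ihlen]; exact hmN),
            Finset.sum_range_succ, ihval t ht, pvW, if_neg h1]
        by_cases e1 : t = s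
        · rw [if_pos e1, if_neg (by omega : ¬ s = m + 1), if_neg (by omega : ¬ t = m + 1),
            if_pos ⟨by rw [e1, hsv], h2⟩]
          rw [e1, ihval s hsN]; ring
        · rw [if_neg e1, if_neg (by rw [hcast t]; omega : ¬ ((t : Int) = pvSumI days m ∧ pvSumI days m < n))]
          by_cases e2 : t = m + 1
          · rw [if_pos e2, if_pos e2, ← e2, ihval t ht]; ring
          · rw [if_neg e2, if_neg e2]; ring
      · rw [if_neg h2, hc1]
        constructor
        · rw [PySem.List.length_pySetD]; exact ihlen
        intro t ht
        rw [PySem.List.pyGetD_pySetD_natCast _ _ _ _ _ (by rw [ihlen]; exact hmN),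
            Finset.sum_range_succ, ihval t ht, pvW, if_neg h1,
            if_neg (by tauto : ¬ ((t : Int) = pvSumI days m ∧ pvSumI days m < n))]
        by_cases e2 : t = m + 1
        · rw [if_pos e2, if_pos e2, ← e2, ihval t ht]; ring
        · rw [if_neg e2, if_neg e2]; ring

theorem buildPrefix (g : Int → Int) (L m : Nat) (hm : m ≤ L - 1) :
    ((List.range m).foldl
      (fun (arr : List Int) (k : Nat) => PySem.List.pySetD arr (1 + (k : Int))
        (PySem.List.pyGetD arr ((1 + (k : Int)) - 1) 0 + g (1 + (k : Int))))
      (List.replicate L 0)).length = L ∧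
    ∀ t : Nat, t < L →
      PySem.List.pyGetD ((List.range m).foldl
        (fun (arr : List Int) (k : Nat) => PySem.List.pySetD arr (1 + (k : Int))
          (PySem.List.pyGetD arr ((1 + (k : Int)) - 1) 0 + g (1 + (k : Int))))
        (List.replicate L 0)) (↑t) 0
      = if t ≤ m then ∑ j ∈ Finset.Icc 1 t, g (↑j) else 0 := by
  induction m with
  | zero =>
    refine ⟨by simp, ?_⟩
    intro t ht
    rw [List.range_zero, List.foldl_nil, PySem.List.pyGetD_natCast, List.getD_replicate _ ht]
    rcases Nat.eq_zero_or_pos t with h | h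
    · subst h; simp
    · rw [if_neg (by omega)]
  | succ m ih =>
    have hL : 0 < L := by omega
    have hmL : m + 1 < L := by omega
    obtain ⟨ihlen, ihval⟩ := ih (by omega)
    rw [List.range_succ, List.foldl_append, List.foldl_cons, List.foldl_nil]
    have hc1 : (1 + (m : Int)) = ((m + 1 : Nat) : Int) := by push_cast; ring
    have hc2 : ((m + 1 : Nat) : Int) - 1 = ((m : Nat) : Int) := by push_cast; ring
    rw [hc1, hc2]
    refine ⟨by rw [PySem.List.length_pySetD]; exact ihlen, ?_⟩
    intro t ht
    rw [PySem.List.pyGetD_pySetD_natCast _ _ _ _ _ (by rw [ihlen]; exact hmL)]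
    by_cases he : t = m + 1
    · subst he
      rw [if_pos rfl, if_pos (le_refl _), ihval m (by omega), if_pos (le_refl m),
        Finset.sum_Icc_succ_top (by omega : 1 ≤ m + 1)]
    · rw [if_neg he, ihval t ht]
      by_cases h2 : t ≤ m
      · rw [if_pos h2, if_pos (by omega)]
      · rw [if_neg h2, if_neg (by omega)]

theorem covSum (n : Int) (days : List Int) (hn : 0 < n) (j : Nat) (hj : j < n.toNat - 1) :
    ∑ i ∈ Finset.range n.toNat, (∑ t ∈ Finset.Icc 1 i, pvW n days j t) * pvDay days i
      = pvContrib n days j := by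
  by_cases h1 : pvSumI days j ≤ (j : Int) + 1
  · rw [pvContrib, if_neg (by omega : ¬ ((j : Int) + 1 < min (pvSumI days j) n))]
    refine Finset.sum_eq_zero ?_
    intro i _
    rw [Finset.sum_eq_zero (fun t _ => by rw [pvW, if_pos h1]), zero_mul]
  · have hjn : ((j : Int) + 1) < n := by omega
    by_cases h2 : pvSumI days j < n
    · set s := (pvSumI days j).toNat with hs
      have hsv : (s : Int) = pvSumI days j := Int.toNat_of_nonneg (by omega)
      have hsm : j + 1 < s := by omega
      have hsN : s < n.toNat := by omega
      have inner : ∀ i : Nat, (∑ t ∈ Finset.Icc 1 i, pvW n days j t)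
          = if i ∈ Finset.Ico (j + 1) s then 1 else 0 := by
        intro i
        have hW : ∀ t : Nat, pvW n days j t
            = (if t = j + 1 then (1:Int) else 0) - (if t = s then (1:Int) else 0) := by
          intro t
          rw [pvW, if_neg h1]
          congr 1
          by_cases e : t = s
          · rw [if_pos e, if_pos ⟨by rw [e, hsv], h2⟩]
          · rw [if_neg e, if_neg (by intro ⟨a, _⟩; exact e (by omega))]
        simp only [hW]
        rw [Finset.sum_sub_distrib, Finset.sum_ite_eq' (Finset.Icc 1 i) (j+1) (fun _ => (1:Int)),
          Finset.sum_ite_eq' (Finset.Icc 1 i) s (fun _ => (1:Int))]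
        simp only [Finset.mem_Icc, Finset.mem_Ico]
        split_ifs <;> omega
      simp only [inner]
      rw [pvContrib, if_pos (by omega : (j : Int) + 1 < min (pvSumI days j) n),
        min_eq_left h2.le, ← hsv]
      simp only [ite_mul, one_mul, zero_mul, Finset.sum_ite_mem]
      rw [Finset.inter_eq_right.mpr (by
          intro x hx
          simp only [Finset.mem_Ico] at hx
          simp only [Finset.mem_range]
          omega),
        Finset.sum_Ico_eq_sub _ (by omega : j + 1 ≤ s), Int.toNat_natCast]
      rfl
    · have inner : ∀ i : Nat, i < n.toNat → (∑ t ∈ Finset.Icc 1 i, pvW n days j t)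
          = if i ∈ Finset.Ico (j + 1) n.toNat then 1 else 0 := by
        intro i hi
        have hW : ∀ t : Nat, pvW n days j t = (if t = j + 1 then (1:Int) else 0) := by
          intro t
          rw [pvW, if_neg h1, if_neg (show ¬((t:Int) = pvSumI days j ∧ pvSumI days j < n) from fun hc => h2 hc.2), sub_zero]
        simp only [hW]
        rw [Finset.sum_ite_eq' (Finset.Icc 1 i) (j+1) (fun _ => (1:Int))]
        simp only [Finset.mem_Icc, Finset.mem_Ico]
        split_ifs <;> omega
      rw [Finset.sum_congr rfl (fun i hi => by
        rw [inner i (Finset.mem_range.mp hi)])]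
      rw [pvContrib, if_pos (by omega : (j : Int) + 1 < min (pvSumI days j) n),
        min_eq_right (by omega : n ≤ pvSumI days j)]
      simp only [ite_mul, one_mul, zero_mul, Finset.sum_ite_mem]
      rw [Finset.inter_eq_right.mpr (by
          intro x hx
          simp only [Finset.mem_Ico] at hx
          simp only [Finset.mem_range]
          omega),
        Finset.sum_Ico_eq_sub _ (by omega : j + 1 ≤ n.toNat)]
      rfl

theorem iccShift (days : List Int) (t : Nat) :
    (∑ j ∈ Finset.Icc 1 t, PySem.List.pyGetD days ((j : Int) - 1) 0) = pvPs days t := by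
  induction t with
  | zero => simp [pvPs]
  | succ t ih =>
    rw [Finset.sum_Icc_succ_top (by omega : 1 ≤ t + 1), ih,
      show ((t + 1 : Nat) : Int) - 1 = ((t : Nat) : Int) from by push_cast; ring,
      PySem.List.pyGetD_natCast]
    show pvPs days t + days.getD t 0 = pvPs days (t + 1)
    rw [pvPs, pvPs, Finset.sum_range_succ]
    rfl

theorem sumRangeList (N : Nat) (f : Nat → Int) :
    ((List.range N).map f).sum = ∑ i ∈ Finset.range N, f i := rfl

theorem A_eq_sum (n : Int) (days : List Int) (hn : 0 < n) :
    solution n days = ∑ j ∈ Finset.range (n.toNat - 1), pvContrib n days j := by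
  unfold solution
  have hN1 : (n - 1 - 0).toNat = n.toNat - 1 := by omega
  have hN1' : (n - 1).toNat = n.toNat - 1 := by omega
  have hN0 : (n - 0).toNat = n.toNat := by omega
  rw [PySem.List.pyRepeat_singleton, PySem.List.pyRange_one 0 (n-1), PySem.List.pyRange_one 1 n,
    PySem.List.pyRange_one 0 n, hN1, hN1', hN0, List.foldl_map, List.foldl_map, List.foldl_map]
  simp only [zero_add, aPreStep]
  set D := (List.range (n.toNat - 1)).foldl
    (fun (arr : List Int) (k : Nat) => aDiffStep n days arr (k : Int))
    (List.replicate n.toNat 0) with hD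
  have dval : ∀ t : Nat, t < n.toNat →
      PySem.List.pyGetD D (↑t) 0 = ∑ j ∈ Finset.range (n.toNat - 1), pvW n days j t :=
    (diffBuild n days hn (n.toNat - 1) (le_refl _)).2
  set P := (List.range (n.toNat - 1)).foldl
    (fun (arr : List Int) (k : Nat) => PySem.List.pySetD arr (1 + (k : Int))
      (PySem.List.pyGetD arr ((1 + (k : Int)) - 1) 0 + PySem.List.pyGetD D (1 + (k : Int)) 0))
    (List.replicate n.toNat 0) with hP
  have pval : ∀ t : Nat, t < n.toNat → PySem.List.pyGetD P (↑t) 0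
      = if t ≤ n.toNat - 1 then ∑ j ∈ Finset.Icc 1 t, PySem.List.pyGetD D (↑j) 0 else 0 :=
    fun t ht => (buildPrefix (fun i => PySem.List.pyGetD D i 0) n.toNat (n.toNat - 1)
      (le_refl _)).2 t ht
  rw [PySem.List.foldl_add, zero_add, sumRangeList]
  rw [Finset.sum_congr rfl (fun i hi => by
    have hiN : i < n.toNat := Finset.mem_range.mp hi
    rw [pval i hiN, if_pos (by omega : i ≤ n.toNat - 1),
      Finset.sum_congr rfl (fun t htm => by
        have htN : t < n.toNat := by
          have := Finset.mem_Icc.mp htm; omega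
        exact dval t htN)])]
  calc (∑ i ∈ Finset.range n.toNat,
      (∑ t ∈ Finset.Icc 1 i, ∑ j ∈ Finset.range (n.toNat - 1), pvW n days j t)
        * PySem.List.pyGetD days (↑i) 0)
      = ∑ i ∈ Finset.range n.toNat, ∑ j ∈ Finset.range (n.toNat - 1),
          (∑ t ∈ Finset.Icc 1 i, pvW n days j t) * pvDay days i := by
        refine Finset.sum_congr rfl (fun i _ => ?_)
        rw [Finset.sum_comm, Finset.sum_mul, PySem.List.pyGetD_natCast]
        rfl
    _ = ∑ j ∈ Finset.range (n.toNat - 1), ∑ i ∈ Finset.range n.toNat,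
          (∑ t ∈ Finset.Icc 1 i, pvW n days j t) * pvDay days i := Finset.sum_comm
    _ = ∑ j ∈ Finset.range (n.toNat - 1), pvContrib n days j := by
        refine Finset.sum_congr rfl (fun j hj => ?_)
        exact covSum n days hn j (Finset.mem_range.mp hj)

theorem B_eq_sum (n : Int) (days : List Int) (hn : 0 < n) :
    solution_alt n days = ∑ j ∈ Finset.range (n.toNat - 1), pvContrib n days j := by
  unfold solution_alt
  rw [if_neg (by omega : ¬ n ≤ 0), PySem.List.pyRepeat_singleton]
  have hc0 : (n + 1 - 1).toNat = n.toNat := by omega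
  have hc1 : (n + 1).toNat = n.toNat + 1 := by omega
  have hc2 : (n - 1 - 0).toNat = n.toNat - 1 := by omega
  rw [PySem.List.pyRange_one 1 (n+1), PySem.List.pyRange_one 0 (n-1), hc0, hc1, hc2,
    List.foldl_map, List.foldl_map]
  simp only [zero_add, bSStep]
  obtain ⟨slen, sval⟩ := buildPrefix (fun i => PySem.List.pyGetD days (i - 1) 0)
    (n.toNat + 1) n.toNat (by omega)
  set S := (List.range n.toNat).foldl
    (fun (arr : List Int) (k : Nat) => PySem.List.pySetD arr (1 + (k : Int))
      (PySem.List.pyGetD arr ((1 + (k : Int)) - 1) 0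
        + (fun i => PySem.List.pyGetD days (i - 1) 0) (1 + (k : Int))))
    (List.replicate (n.toNat + 1) 0) with hS
  have sv : ∀ t : Nat, t ≤ n.toNat → PySem.List.pyGetD S (↑t) 0 = pvPs days t := by
    intro t ht
    rw [sval t (by omega), if_pos ht]
    exact iccShift days t
  have hfun : (fun (prize : Int) (k : Nat) =>
      if min ((k : Int) + PySem.List.pyGetD days (↑k) 0) n > (k : Int) + 1 then
        prize + (PySem.List.pyGetD S (min ((k : Int) + PySem.List.pyGetD days (↑k) 0) n) 0
          - PySem.List.pyGetD S ((k : Int) + 1) 0)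
      else prize)
      = fun (prize : Int) (k : Nat) => prize +
        (if min ((k : Int) + PySem.List.pyGetD days (↑k) 0) n > (k : Int) + 1 then
          (PySem.List.pyGetD S (min ((k : Int) + PySem.List.pyGetD days (↑k) 0) n) 0
            - PySem.List.pyGetD S ((k : Int) + 1) 0)
         else 0) := by
    funext p k
    split_ifs <;> simp
  show List.foldl _ 0 (List.range (n.toNat - 1)) = _
  rw [hfun, PySem.List.foldl_add, zero_add]
  show (∑ k ∈ Finset.range (n.toNat - 1),
    if min ((k : Int) + PySem.List.pyGetD days (↑k) 0) n > (k : Int) + 1 then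
      (PySem.List.pyGetD S (min ((k : Int) + PySem.List.pyGetD days (↑k) 0) n) 0
        - PySem.List.pyGetD S ((k : Int) + 1) 0)
    else 0) = _
  refine Finset.sum_congr rfl (fun j hj => ?_)
  have hjN : j < n.toNat - 1 := Finset.mem_range.mp hj
  rw [PySem.List.pyGetD_natCast]
  have hsum : (j : Int) + days.getD j 0 = pvSumI days j := rfl
  rw [hsum, pvContrib]
  by_cases hcond : (j : Int) + 1 < min (pvSumI days j) n
  · rw [if_pos hcond, if_pos hcond]
    have hmn : 0 ≤ min (pvSumI days j) n := by
      have : (0:Int) ≤ (j:Int) := Int.natCast_nonneg j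
      omega
    have hmle : (min (pvSumI days j) n).toNat ≤ n.toNat := by
      have := min_le_right (pvSumI days j) n; omega
    rw [show min (pvSumI days j) n = (((min (pvSumI days j) n).toNat : Nat) : Int) from
        (Int.toNat_of_nonneg hmn).symm,
      sv _ hmle,
      show ((j : Int) + 1) = ((j + 1 : Nat) : Int) from by push_cast; ring,
      sv (j + 1) (by omega), Int.toNat_natCast]
  · rw [if_neg hcond, if_neg hcond]

-- ===== VERDICT (by name: the statement is the Claim_ definition above) =====
theorem solution_spec : Claim_equal_solution := by
  intro n days _ _
  unfold Spec_solution
  by_cases hn : 0 < n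
  · rw [A_eq_sum n days hn, B_eq_sum n days hn]
  · have h0 : n ≤ 0 := by omega
    have hA : solution n days = 0 := by
      simp [solution, PySem.List.pyRange_one_eq_nil (by omega : n - 1 ≤ 0),
        PySem.List.pyRange_one_eq_nil (by omega : n ≤ (0:Int)),
        PySem.List.pyRange_one_eq_nil (by omega : n ≤ (1:Int))]
    have hB : solution_alt n days = 0 := by simp [solution_alt, h0]
    rw [hA, hB]
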